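-- pv_equiv track=rewrite | github.com/ajvill/quant | convert_acct_fidelity_csv.py | parse_underlying
-- ===== SOURCE A (Python) =====
-- def parse_underlying(test_string):
--     """
--     This method filters out the underlying from an option name
--     :param test_string:  String will test for underlying
--     :return:
--     """
--     security = test_string
--     underlying = ""
--     underlying_len = 0
--     is_a_stock = False
--     ticker_locate = True
--     ticker_count = 0
--     char_count = 0
--
--     if security.startswith('-', 1):
--         # This is an option
--         for element in security:
--             if element.isalpha() and ticker_count < 5 and ticker_locate:
--                 underlying = underlying + element
--                 ticker_count += 1
--             if element.isnumeric() and ticker_count < 5 and char_count > 0: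
--                 ticker_locate = False
--             char_count += 1
--     else:
--         # This is a stock
--         underlying = security
--         is_a_stock = True
--     # remove any whitespace in front of ticker symbol
--     underlying = underlying.lstrip(' ')
--     underlying_len = len(underlying)
--     return underlying, underlying_len, is_a_stock
-- ===== SOURCE B (Python) =====
-- def parse_underlying(test_string):
--     if test_string[1:2] == '-':
--         # option: keep chars up to the first digit at index >= 1, then letters only, capped at 5
--         prefix = test_string[:1]
--         for c in test_string[1:]:
--             if c.isnumeric():
--                 break
--             prefix += c
--         underlying = ''.join(c for c in prefix if c.isalpha())[:5]
--         is_a_stock = False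
--     else:
--         underlying = test_string
--         is_a_stock = True
--     underlying = underlying.lstrip(' ')
--     return underlying, len(underlying), is_a_stock
-- ===== Notes on version B (the rewrite author's own statement) =====
-- stated objective: simpler
-- what changed: Replaces A's single-pass state machine with four mutable flags/counters (ticker_locate, ticker_count, char_count) by a three-stage pipeline: cut the string at the first digit after index 0, filter to letters, cap at five.
import Mathlib
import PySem

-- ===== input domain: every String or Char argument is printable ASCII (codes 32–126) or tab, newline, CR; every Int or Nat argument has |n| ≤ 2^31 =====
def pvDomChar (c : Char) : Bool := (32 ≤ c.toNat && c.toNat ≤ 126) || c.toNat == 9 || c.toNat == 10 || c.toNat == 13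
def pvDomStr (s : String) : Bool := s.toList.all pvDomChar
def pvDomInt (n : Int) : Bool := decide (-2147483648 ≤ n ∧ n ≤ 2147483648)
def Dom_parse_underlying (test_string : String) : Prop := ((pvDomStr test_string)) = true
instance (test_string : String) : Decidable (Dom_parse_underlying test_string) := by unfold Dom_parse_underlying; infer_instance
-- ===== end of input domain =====

-- B replaces A's one-pass state machine (four flags/counters) by a pipeline: cut at the first
-- digit after index 0, filter to letters, cap at 5 — simpler, same O(n) cost.

-- ===== PORT A =====
-- A's for-loop, one step per character; state = (underlying, ticker_count, ticker_locate, char_count).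
-- Python's .isnumeric() is ported as PySem.Chars.isdigit — exact on the ASCII domain Dom_.
def pvLoopA : List Char → List Char → Int → Bool → Int → List Char
  | [], u, _, _, _ => u
  | e :: rest, u, tc, locate, cc =>
    let p := if PySem.Chars.isalpha e && decide (tc < 5) && locate then (u ++ [e], tc + 1) else (u, tc)
    let locate' := if PySem.Chars.isdigit e && decide (p.2 < 5) && decide (cc > 0) then false else locate
    pvLoopA rest p.1 p.2 locate' (cc + 1)

def parse_underlying (test_string : String) : String × Int × Bool :=
  let cs := test_string.toList
  if cs[1]? == some '-' then  -- security.startswith('-', 1): true iff len ≥ 2 and s[1] = '-'; exact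
    let u := (pvLoopA cs [] 0 true 0).dropWhile (· == ' ')  -- .lstrip(' ') drops leading spaces only; exact
    (String.ofList u, (u.length : Int), false)
  else
    let u := cs.dropWhile (· == ' ')
    (String.ofList u, (u.length : Int), true)

-- ===== PORT B =====
-- B's for/break loop over test_string[1:]: the prefix up to (excluding) the first digit.
def pvPrefixTilDigit : List Char → List Char
  | [] => []
  | c :: rest => if PySem.Chars.isdigit c then [] else c :: pvPrefixTilDigit rest

def parse_underlying_alt (test_string : String) : String × Int × Bool :=
  let cs := test_string.toList
  if cs[1]? == some '-' then  -- test_string[1:2] == '-'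
    let pre := cs.take 1 ++ pvPrefixTilDigit (cs.drop 1)  -- test_string[:1] + loop over test_string[1:]
    let u := ((pre.filter PySem.Chars.isalpha).take 5).dropWhile (· == ' ')
    (String.ofList u, (u.length : Int), false)
  else
    let u := cs.dropWhile (· == ' ')
    (String.ofList u, (u.length : Int), true)

-- ===== PRECONDITION & SPEC =====
def Spec_parse_underlying (test_string : String) (out : String × Int × Bool) : Prop := out = parse_underlying_alt test_string
instance (test_string : String) (out : String × Int × Bool) : Decidable (Spec_parse_underlying test_string out) := by unfold Spec_parse_underlying; infer_instance

-- ===== CLAIM (what is proved, stated in full; the proofs are below) =====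
def Claim_equal_parse_underlying : Prop := ∀ (test_string : String), Dom_parse_underlying test_string → Spec_parse_underlying test_string (parse_underlying test_string)

-- ===== LEMMAS AND PROOFS =====

theorem pv_alpha_not_digit (c : Char) :
    PySem.Chars.isalpha c = true → PySem.Chars.isdigit c = false := by
  simp only [PySem.Chars.isalpha, PySem.Chars.isdigit, PySem.Chars.isupper, PySem.Chars.islower,
        Bool.or_eq_true, Bool.and_eq_true, decide_eq_true_eq, Char.le_def, UInt32.le_iff_toNat_le,
        Bool.and_eq_false_iff, decide_eq_false_iff_not, not_le]
  have h0 : ('0':Char).val.toNat = 48 := rfl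
  have h9 : ('9':Char).val.toNat = 57 := rfl
  have hA : ('A':Char).val.toNat = 65 := rfl
  have hZ : ('Z':Char).val.toNat = 90 := rfl
  have ha : ('a':Char).val.toNat = 97 := rfl
  have hz : ('z':Char).val.toNat = 122 := rfl
  omega

theorem pvLoopA_locate_false (rest : List Char) :
    ∀ (u : List Char) (tc cc : Int), pvLoopA rest u tc false cc = u := by
  induction rest with
  | nil => intro u tc cc; rfl
  | cons e rest ih =>
    intro u tc cc
    simp only [pvLoopA, Bool.and_false, Bool.false_eq_true, if_false, ite_self]
    exact ih u tc (cc + 1)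

theorem pvLoopA_eq (rest : List Char) :
    ∀ (u : List Char) (tc cc : Int), 0 ≤ tc → tc ≤ 5 → 1 ≤ cc →
    pvLoopA rest u tc true cc
      = u ++ ((pvPrefixTilDigit rest).filter PySem.Chars.isalpha).take (5 - tc).toNat := by
  induction rest with
  | nil => intro u tc cc _ _ _; simp [pvLoopA, pvPrefixTilDigit]
  | cons e rest ih =>
    intro u tc cc h0 h5 hcc
    by_cases ha : PySem.Chars.isalpha e = true
    · have hd : PySem.Chars.isdigit e = false := pv_alpha_not_digit e ha
      by_cases hlt : tc < 5
      · simp only [pvLoopA, ha, hlt, decide_true, Bool.and_self, Bool.true_and, Bool.and_true,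
          if_true, hd, Bool.false_and, Bool.false_eq_true, if_false]
        rw [ih (u ++ [e]) (tc + 1) (cc + 1) (by omega) (by omega) (by omega)]
        simp only [pvPrefixTilDigit, hd, Bool.false_eq_true, if_false, List.filter_cons, ha,
          if_true]
        have ht : (5 - tc).toNat = (5 - (tc + 1)).toNat + 1 := by omega
        rw [ht, List.take_succ_cons, List.append_assoc]
        rfl
      · have htc : tc = 5 := by omega
        subst htc
        simp only [pvLoopA, decide_eq_true_eq, lt_irrefl, decide_false, Bool.and_false,
          Bool.false_and, Bool.false_eq_true, if_false, hd]
        rw [ih u 5 (cc + 1) (by omega) (by omega) (by omega)]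
        simp
    · have ha' : PySem.Chars.isalpha e = false := by simpa using ha
      by_cases hd : PySem.Chars.isdigit e = true
      · -- e is a digit at index cc ≥ 1
        by_cases hlt : tc < 5
        · simp only [pvLoopA, ha', Bool.false_and, Bool.false_eq_true, if_false, hd, hlt,
            decide_true, Bool.true_and, Bool.and_true, show decide (cc > 0) = true by
              simpa using (by omega : 0 < cc), if_true]
          rw [pvLoopA_locate_false]
          simp [pvPrefixTilDigit, hd]
        · have htc : tc = 5 := by omega
          subst htc
          simp only [pvLoopA, ha', Bool.false_and, Bool.false_eq_true, if_false,
            decide_eq_true_eq, lt_irrefl, decide_false, Bool.and_false]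
          rw [ih u 5 (cc + 1) (by omega) (by omega) (by omega)]
          simp [pvPrefixTilDigit, hd]
      · have hd' : PySem.Chars.isdigit e = false := by simpa using hd
        simp only [pvLoopA, ha', Bool.false_and, Bool.false_eq_true, if_false, hd']
        rw [ih u tc (cc + 1) h0 h5 (by omega)]
        simp [pvPrefixTilDigit, hd', List.filter_cons, ha']

-- the two option-branch pipelines agree on any nonempty char list
theorem pv_option_eq (c0 : Char) (rest : List Char) :
    pvLoopA (c0 :: rest) [] 0 true 0
      = (((c0 :: rest).take 1 ++ pvPrefixTilDigit ((c0 :: rest).drop 1)).filter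
          PySem.Chars.isalpha).take 5 := by
  have hpre : (c0 :: rest).take 1 ++ pvPrefixTilDigit ((c0 :: rest).drop 1)
      = c0 :: pvPrefixTilDigit rest := rfl
  rw [hpre]
  by_cases ha : PySem.Chars.isalpha c0 = true
  · have hd : PySem.Chars.isdigit c0 = false := pv_alpha_not_digit c0 ha
    have h1 : pvLoopA (c0 :: rest) [] 0 true 0 = pvLoopA rest [c0] 1 true 1 := by
      simp only [pvLoopA, ha, hd]
      norm_num
    rw [h1, pvLoopA_eq rest [c0] 1 1 (by omega) (by omega) (by omega)]
    have h2 : List.filter PySem.Chars.isalpha (c0 :: pvPrefixTilDigit rest)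
        = c0 :: List.filter PySem.Chars.isalpha (pvPrefixTilDigit rest) := by
      rw [List.filter_cons_of_pos ha]
    rw [h2]
    have h3 : ((5:Int) - 1).toNat = 4 := rfl
    rw [h3]
    rfl
  · have ha' : PySem.Chars.isalpha c0 = false := by simpa using ha
    have h1 : pvLoopA (c0 :: rest) [] 0 true 0 = pvLoopA rest [] 0 true 1 := by
      simp only [pvLoopA, ha']
      norm_num
    rw [h1, pvLoopA_eq rest [] 0 1 (by omega) (by omega) (by omega)]
    have h2 : List.filter PySem.Chars.isalpha (c0 :: pvPrefixTilDigit rest)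
        = List.filter PySem.Chars.isalpha (pvPrefixTilDigit rest) := by
      rw [List.filter_cons_of_neg (by simp [ha'])]
    rw [h2]
    have h3 : ((5:Int) - 0).toNat = 5 := rfl
    rw [h3]
    rfl

-- ===== VERDICT (by name: the statement is the Claim_ definition above) =====
theorem parse_underlying_spec : Claim_equal_parse_underlying := by
  intro s _
  unfold Spec_parse_underlying parse_underlying parse_underlying_alt
  cases h : s.toList[1]? == some '-' with
  | false => simp [h]
  | true =>
    simp only [h, if_true]
    cases hcs : s.toList with
    | nil => rw [hcs] at h; simp at h
    | cons c0 rest => rw [pv_option_eq]
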